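-- pv_equiv track=rewrite | github.com/ChestnutMongrel/advent-of-code | 2016/07_day.py | is_suitable_abba
-- ===== SOURCE A (Python) =====
-- def splitting(data: str) -> tuple:
--     inside_brackets = list()
--     outside_brackets = list()
--
--     split_data = data.split('[')
--     for line in split_data:
--         if ']' in line:
--             inside, outside = line.split(']')
--             inside_brackets.append(inside)
--             outside_brackets.append(outside)
--         else:
--             outside_brackets.append(line)
--
--     return inside_brackets, outside_brackets
--
-- def is_contain_abba(line: str) -> bool:
--     for i in range(len(line) - 3):
--         first, second, third, fourth = line[i:i + 4]
--         if first == fourth and second == third and first != second: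
--             return True
--     return False
--
-- def is_suitable_abba(data: str) -> bool:
--     inside, outside = splitting(data)
--
--     for line in inside:
--         if is_contain_abba(line):
--             return False
--
--     for line in outside:
--         if is_contain_abba(line):
--             return True
--
--     return False
-- ===== SOURCE B (Python) =====
-- def is_suitable_abba(data: str) -> bool:
--     def has_abba(s) -> bool:
--         return any(a == d and b == c and a != b
--                    for a, b, c, d in zip(s, s[1:], s[2:], s[3:]))
--
--     good = False
--     chunk = []
--     for ch in data:
--         if ch == ']':
--             if has_abba(chunk):
--                 return False
--             chunk = []
--         elif ch == '[':
--             if has_abba(chunk):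
--                 good = True
--             chunk = []
--         else:
--             chunk.append(ch)
--     return good or has_abba(chunk)
-- ===== Notes on version B (the rewrite author's own statement) =====
-- stated objective: alternative
-- what changed: Replaces the two-level split('[')/split(']') list building plus two scan loops and the manual index-window ABBA loop by a single forward character pass that cuts chunks at either bracket (a chunk ending in ']' is inside, any other chunk outside) and checks each chunk once with a zip-based ABBA test.
-- crash fix: A raises ValueError (unpacking line.split(']')) whenever some '['-delimited piece contains two or more ']'; B just closes an inside chunk at every ']' and returns a normal bool (False on the witness 'ab]cd]ef'). — e.g. on is_suitable_abba("ab]cd]ef"): A raises ValueError, B returns false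
import Mathlib
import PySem

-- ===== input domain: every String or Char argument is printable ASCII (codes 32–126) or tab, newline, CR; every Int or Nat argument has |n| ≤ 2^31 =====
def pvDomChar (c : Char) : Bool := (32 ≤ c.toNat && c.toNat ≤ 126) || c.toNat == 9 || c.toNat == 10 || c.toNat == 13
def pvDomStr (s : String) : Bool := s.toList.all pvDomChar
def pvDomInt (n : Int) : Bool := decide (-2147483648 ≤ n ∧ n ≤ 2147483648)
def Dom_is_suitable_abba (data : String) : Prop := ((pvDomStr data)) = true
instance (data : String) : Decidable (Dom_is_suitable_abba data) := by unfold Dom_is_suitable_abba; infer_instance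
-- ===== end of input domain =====

-- ===== PORT A =====
-- B replaces the split('[')/split(']') partitioning plus the index-window ABBA loop by a
-- single forward chunking pass with a zip-based ABBA test (objective: alternative).
def pv_is_contain_abba (line : String) : Bool :=
  (PySem.List.pyRange 0 (PySem.Str.len line - 3)).foldl
    (fun acc i =>
      match (PySem.Str.slice line (some i) (some (i + 4))).toList with
      | [first, second, third, fourth] =>
          acc || (first == fourth && second == third && !(first == second))
      | _ => acc)
    false

def pv_splitting (data : String) : Option (List String × List String) :=
  match PySem.Str.split? data "[" with
  | none => none
  | some split_data =>
    split_data.foldl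
      (fun acc line =>
        match acc with
        | none => none
        | some (ins, outs) =>
          if PySem.Str.isIn "]" line then
            match PySem.Str.split? line "]" with
            | some [inside, outside] => some (ins ++ [inside], outs ++ [outside])
            | _ => none          -- ValueError: unpacking mismatch
          else some (ins, outs ++ [line]))
      (some ([], []))

def is_suitable_abba (data : String) : Bool :=
  match pv_splitting data with
  | none => false                -- unreachable under Pre_ (A raises ValueError there)
  | some (inside, outside) =>
    if inside.any pv_is_contain_abba then false
    else outside.any pv_is_contain_abba

-- ===== PORT B =====
def pv_has_abba (s : List Char) : Bool :=
  (((s.zip (s.drop 1)).zip ((s.drop 2).zip (s.drop 3))).any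
    fun p => p.1.1 == p.2.2 && p.1.2 == p.2.1 && !(p.1.1 == p.1.2))

def pv_altGo : List Char → Bool → List Char → Bool
  | [], good, chunk => good || pv_has_abba chunk
  | ch :: rest, good, chunk =>
    if ch = ']' then
      if pv_has_abba chunk then false else pv_altGo rest good []
    else if ch = '[' then
      pv_altGo rest (good || pv_has_abba chunk) []
    else pv_altGo rest good (chunk ++ [ch])

def is_suitable_abba_alt (data : String) : Bool :=
  pv_altGo data.toList false []

-- ===== PRECONDITION & SPEC =====
-- Pre_ excludes exactly the inputs where A raises ValueError: some '['-delimited piece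
-- containing two or more ']' (then `inside, outside = line.split(']')` fails to unpack).
def Pre_is_suitable_abba (data : String) : Prop :=
  ∀ seg ∈ PySem.Chars.splitOn data.toList ['['], seg.count ']' ≤ 1
instance (data : String) : Decidable (Pre_is_suitable_abba data) := by
  unfold Pre_is_suitable_abba; infer_instance
def pvWitness_is_suitable_abba : String := "abba[mnop]qrst"

-- A raises ValueError (unpacking line.split(']')) whenever some '['-delimited piece has
-- two or more ']'; B just closes an inside chunk at every ']' and returns a normal bool
-- (made checkable by the theorem is_suitable_abba_raises at the bottom of the file).
def Raises_is_suitable_abba (data : String) : Prop :=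
  ∃ seg ∈ PySem.Chars.splitOn data.toList ['['], 2 ≤ seg.count ']'
instance (data : String) : Decidable (Raises_is_suitable_abba data) := by
  unfold Raises_is_suitable_abba; infer_instance
def pvRaiseWitness_is_suitable_abba : String := "ab]cd]ef"
def pvRaiseWitnessOut_is_suitable_abba : Bool := false

def Spec_is_suitable_abba (data : String) (out : Bool) : Prop := out = is_suitable_abba_alt data
instance (data : String) (out : Bool) : Decidable (Spec_is_suitable_abba data out) := by
  unfold Spec_is_suitable_abba; infer_instance

-- ===== CLAIM (what is proved, stated in full; the proofs are below) =====
def Claim_equal_is_suitable_abba : Prop := ∀ (data : String), Dom_is_suitable_abba data → Pre_is_suitable_abba data → Spec_is_suitable_abba data (is_suitable_abba data)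
def Claim_raises_is_suitable_abba : Prop := (∀ (data : String), Dom_is_suitable_abba data → Raises_is_suitable_abba data → ¬ Pre_is_suitable_abba data) ∧ (Dom_is_suitable_abba (pvRaiseWitness_is_suitable_abba) ∧ Raises_is_suitable_abba (pvRaiseWitness_is_suitable_abba) ∧ is_suitable_abba_alt (pvRaiseWitness_is_suitable_abba) = pvRaiseWitnessOut_is_suitable_abba)

-- ===== LEMMAS AND PROOFS =====

def pvSplit (k : Char) : List Char → List (List Char)
  | [] => [[]]
  | c :: r =>
    if c = k then [] :: pvSplit k r
    else
      match pvSplit k r with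
      | [] => [[c]]
      | h :: t => (c :: h) :: t

def pvConsHead (p : List Char) : List (List Char) → List (List Char)
  | [] => [p]
  | h :: t => (p ++ h) :: t

theorem pvSplit_ne_nil (k : Char) (l : List Char) : pvSplit k l ≠ [] := by
  induction l with
  | nil => simp [pvSplit]
  | cons c r ih =>
    simp only [pvSplit]; split
    · simp
    · split <;> simp

theorem go_spec (k : Char) (fuel : Nat) : ∀ (l cur : List Char) (acc : List (List Char)),
    l.length ≤ fuel →
    PySem.Chars.splitOn.go [k] fuel l cur acc =
      acc.reverse ++ pvConsHead cur.reverse (pvSplit k l) := by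
  induction fuel with
  | zero =>
    intro l cur acc hl
    have : l = [] := by cases l <;> simp_all
    subst this
    simp [PySem.Chars.splitOn.go, pvSplit, pvConsHead]
  | succ n ih =>
    intro l cur acc hl
    cases l with
    | nil => simp [PySem.Chars.splitOn.go, pvSplit, pvConsHead]
    | cons c rest =>
      simp only [PySem.Chars.splitOn.go]
      by_cases hck : k = c
      · subst hck
        have hpre : List.isPrefixOf [k] (k :: rest) = true := by simp [List.isPrefixOf]
        rw [if_pos hpre]
        simp only [List.length_singleton, List.drop_one, List.tail_cons]
        rw [ih rest [] _ (by simpa using Nat.le_of_succ_le_succ hl)]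
        simp only [pvSplit]
        cases hs : pvSplit k rest with
        | nil => exact absurd hs (pvSplit_ne_nil k rest)
        | cons h t => simp [pvConsHead]
      · have hpre : List.isPrefixOf [k] (c :: rest) = false := by
          simp [List.isPrefixOf]; exact fun h => absurd h hck
        rw [if_neg (by simp [hpre])]
        rw [ih rest (c :: cur) acc (by simpa using Nat.le_of_succ_le_succ hl)]
        simp only [pvSplit]
        rw [if_neg (fun h => hck h.symm)]
        cases hs : pvSplit k rest with
        | nil => exact absurd hs (pvSplit_ne_nil k rest)
        | cons h t => simp [pvConsHead]

theorem splitOn_eq_pvSplit (k : Char) (l : List Char) :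
    PySem.Chars.splitOn l [k] = pvSplit k l := by
  rw [PySem.Chars.splitOn, go_spec k (l.length + 1) l [] [] (by omega)]
  cases hs : pvSplit k l with
  | nil => exact absurd hs (pvSplit_ne_nil k l)
  | cons h t => simp [pvConsHead]

theorem pvSplit_append (k : Char) (buf cs : List Char) (h : k ∉ buf) :
    ∃ h1 t, pvSplit k cs = h1 :: t ∧ pvSplit k (buf ++ cs) = (buf ++ h1) :: t := by
  induction buf with
  | nil =>
    obtain ⟨h1, t, he⟩ : ∃ h1 t, pvSplit k cs = h1 :: t := by
      cases hc : pvSplit k cs with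
      | nil => exact absurd hc (pvSplit_ne_nil k cs)
      | cons a b => exact ⟨a, b, rfl⟩
    exact ⟨h1, t, he, by simpa using he⟩
  | cons c buf ih =>
    obtain ⟨h1, t, h2, h3⟩ := ih (by simp at h; exact h.2)
    refine ⟨h1, t, h2, ?_⟩
    have hck : c ≠ k := by simp at h; exact fun hh => h.1 hh.symm
    simp only [List.cons_append, pvSplit, if_neg hck, h3]

theorem pvSplit_of_not_mem (k : Char) (l : List Char) (h : k ∉ l) : pvSplit k l = [l] := by
  induction l with
  | nil => rfl
  | cons a s ih =>
    simp at h
    simp only [pvSplit, ih h.2]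
    rw [if_neg (fun hh => h.1 hh.symm)]

theorem pvSplit_of_count_one (l : List Char) (hc : l.count ']' ≤ 1) (hm : ']' ∈ l) :
    pvSplit ']' l = [l.takeWhile (· ≠ ']'), (l.dropWhile (· ≠ ']')).tail] := by
  induction l with
  | nil => simp at hm
  | cons c r ih =>
    by_cases h : c = ']'
    · subst h
      have hr : ']' ∉ r := by
        intro hmem
        have := List.count_pos_iff.mpr hmem
        simp at hc
        omega
      have : pvSplit ']' r = [r] := by
        clear hc hm ih
        induction r with
        | nil => rfl
        | cons a s ihs =>
          simp at hr
          simp only [pvSplit, ihs hr.2]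
          rw [if_neg (fun hh => hr.1 hh.symm)]
      simp [pvSplit, this]
    · have hm' : ']' ∈ r := by cases hm with | head => exact absurd rfl h | tail _ h2 => exact h2
      have hc' : r.count ']' ≤ 1 := by simp [List.count_cons] at hc ⊢; omega
      have := ih hc' hm'
      simp only [pvSplit, if_neg h, this, List.takeWhile, List.dropWhile]
      simp [h]

theorem pv_takeWhile_append (buf h : List Char) (hb : ']' ∉ buf) :
    (buf ++ ']' :: h).takeWhile (· ≠ ']') = buf ∧
    (buf ++ ']' :: h).dropWhile (· ≠ ']') = ']' :: h := by
  induction buf with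
  | nil => simp
  | cons c buf ih =>
    simp at hb
    obtain ⟨ht, hd⟩ := ih hb.2
    have hcne : (c ≠ ']') = True := by
      simp only [ne_eq, eq_iff_iff, iff_true]
      exact fun hh => hb.1 hh.symm
    constructor <;>
      simp only [List.cons_append, List.takeWhile_cons, List.dropWhile_cons, hcne,
        decide_true, if_true, ht, hd]

def pvInsideParts (cs : List Char) : List (List Char) :=
  (pvSplit '[' cs).filterMap
    (fun seg => if ']' ∈ seg then some (seg.takeWhile (· ≠ ']')) else none)
def pvOutsideParts (cs : List Char) : List (List Char) :=
  (pvSplit '[' cs).map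
    (fun seg => if ']' ∈ seg then (seg.dropWhile (· ≠ ']')).tail else seg)
def pvEval (cs : List Char) (good : Bool) : Bool :=
  if (pvInsideParts cs).any pv_has_abba then false
  else good || (pvOutsideParts cs).any pv_has_abba

def pvHasWin (l : List Char) : Prop := ∃ a b, a ≠ b ∧ [a, b, b, a] <:+: l

theorem pv_has_abba_iff (l : List Char) : pv_has_abba l = true ↔ pvHasWin l := by
  induction l with
  | nil => simp [pv_has_abba, pvHasWin]
  | cons c r ih =>
    match r, ih with
    | [], _ => simp [pv_has_abba, pvHasWin]; intro a b _ h; simpa using h.length_le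
    | [x], _ => simp [pv_has_abba, pvHasWin]; intro a b _ h; simpa using h.length_le
    | [x, y], _ => simp [pv_has_abba, pvHasWin]; intro a b _ h; simpa using h.length_le
    | x :: y :: z :: t, ih =>
      have step : pv_has_abba (c :: x :: y :: z :: t) =
          ((c == z && x == y && !(c == x)) || pv_has_abba (x :: y :: z :: t)) := by
        simp [pv_has_abba, List.any_cons]
      rw [step]
      constructor
      · intro h
        rcases Bool.or_eq_true_iff.mp h with h1 | h2
        · refine ⟨c, x, ?_, ?_⟩
          · simp at h1; exact h1.2
          · simp at h1
            exact ⟨[], t, by simp [h1.1.1, h1.1.2]⟩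
        · obtain ⟨a, b, hab, hinf⟩ := ih.mp h2
          exact ⟨a, b, hab, hinf.trans (List.infix_cons_iff.mpr (Or.inr (List.infix_refl _)) : (x :: y :: z :: t) <:+: c :: x :: y :: z :: t)⟩
      · rintro ⟨a, b, hab, hinf⟩
        rcases List.infix_cons_iff.mp hinf with hpre | hinf'
        · obtain ⟨t2, ht2⟩ := hpre
          have e1 : a = c := by injection ht2
          have rest := ht2
          simp at rest
          obtain ⟨e1', e2, e3, e4, _⟩ := rest
          apply Bool.or_eq_true_iff.mpr; left
          subst e1'; subst e2
          simp [← e3, ← e4]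
          exact hab
        · exact Bool.or_eq_true_iff.mpr (Or.inr (ih.mpr ⟨a, b, hab, hinf'⟩))

def pvQ (line : String) (i : Int) : Bool :=
  match (PySem.Str.slice line (some i) (some (i + 4))).toList with
  | [first, second, third, fourth] => first == fourth && second == third && !(first == second)
  | _ => false

theorem pv_fold_or (line : String) (xs : List Int) (b : Bool) :
    xs.foldl
      (fun acc i =>
        match (PySem.Str.slice line (some i) (some (i + 4))).toList with
        | [first, second, third, fourth] =>
            acc || (first == fourth && second == third && !(first == second))
        | _ => acc)
      b = (b || xs.any (pvQ line)) := by
  induction xs generalizing b with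
  | nil => simp
  | cons x xs ih =>
    simp only [List.foldl_cons, List.any_cons]
    have hb : (match (PySem.Str.slice line (some x) (some (x + 4))).toList with
        | [first, second, third, fourth] =>
            b || (first == fourth && second == third && !(first == second))
        | _ => b) = (b || pvQ line x) := by
      unfold pvQ
      rcases hsc : (PySem.Str.slice line (some x) (some (x + 4))).toList with _ | ⟨a, _ | ⟨c, _ | ⟨d, _ | ⟨e, _ | t⟩⟩⟩⟩ <;> simp
    rw [hb, ih, Bool.or_assoc]

theorem pv_is_contain_abba_iff (line : String) :
    pv_is_contain_abba line = true ↔ pvHasWin line.toList := by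
  unfold pv_is_contain_abba
  rw [pv_fold_or]
  simp only [Bool.false_or, List.any_eq_true]
  constructor
  · rintro ⟨i, hmem, hq⟩
    rw [PySem.List.mem_pyRange_one] at hmem
    obtain ⟨h0, hlt⟩ := hmem
    rw [PySem.Str.len_eq] at hlt
    set l := line.toList with hl
    obtain ⟨m, rfl⟩ := Int.eq_ofNat_of_zero_le h0
    have hm4 : m + 4 ≤ l.length := by omega
    unfold pvQ at hq
    have hcast : ((m:Int)+4) = ((m+4:Nat):Int) := by push_cast; ring
    rw [hcast, PySem.Str.toList_slice, PySem.Chars.slice_eq_listSlice,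
        PySem.List.slice_natCast] at hq
    have h4 : m + 4 - m = 4 := by omega
    rw [h4] at hq
    have hlen : ((l.drop m).take 4).length = 4 := by
      simp [List.length_take, List.length_drop]; omega
    rcases hw : (l.drop m).take 4 with _ | ⟨a, _ | ⟨b, _ | ⟨c, _ | ⟨d, _ | t⟩⟩⟩⟩ <;>
      rw [hw] at hq hlen <;> simp at hq hlen
    · obtain ⟨⟨had, hbc⟩, hab⟩ := hq
      refine ⟨a, b, fun h => hab h, ?_⟩
      subst had; subst hbc
      have hpre : [a, b, b, a] <+: l.drop m := by
        rw [← hw]; exact List.take_prefix 4 _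
      obtain ⟨t2, ht2⟩ := hpre
      exact ⟨l.take m, t2, by rw [List.append_assoc, ht2, List.take_append_drop]⟩
  · rintro ⟨a, b, hab, hinf⟩
    obtain ⟨s, t, hst⟩ := hinf
    set l := line.toList with hl
    have hdrop : l.drop s.length = [a,b,b,a] ++ t := by
      rw [← hst]; simp
    have hlen : s.length + 4 ≤ l.length := by
      have := congrArg List.length hst
      simp at this; omega
    refine ⟨(s.length : Int), ?_, ?_⟩
    · rw [PySem.List.mem_pyRange_one, PySem.Str.len_eq, ← hl]
      constructor
      · positivity
      · omega
    · unfold pvQ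
      have hcast : ((s.length:Int)+4) = ((s.length+4:Nat):Int) := by push_cast; ring
      rw [hcast, PySem.Str.toList_slice, PySem.Chars.slice_eq_listSlice,
          PySem.List.slice_natCast]
      have h4 : s.length + 4 - s.length = 4 := by omega
      rw [h4, ← hl, hdrop]
      simp [hab]

theorem pv_is_contain_abba_eq (line : String) :
    pv_is_contain_abba line = pv_has_abba line.toList := by
  rw [Bool.eq_iff_iff, pv_is_contain_abba_iff, pv_has_abba_iff]

theorem altGo_eq (cs : List Char) : ∀ (buf : List Char) (good : Bool),
    '[' ∉ buf → ']' ∉ buf →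
    (∀ seg ∈ pvSplit '[' (buf ++ cs), seg.count ']' ≤ 1) →
    pv_altGo cs good buf = pvEval (buf ++ cs) good := by
  induction cs with
  | nil =>
    intro buf good hb1 hb2 _
    simp only [pv_altGo, List.append_nil, pvEval, pvInsideParts, pvOutsideParts,
      pvSplit_of_not_mem '[' buf hb1]
    simp [hb2]
  | cons c rest ih =>
    intro buf good hb1 hb2 hpre
    by_cases hc : c = ']'
    · subst hc
      -- structure of the split
      obtain ⟨h, t, hsr⟩ : ∃ h t, pvSplit '[' rest = h :: t := by
        cases hs : pvSplit '[' rest with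
        | nil => exact absurd hs (pvSplit_ne_nil '[' rest)
        | cons a b => exact ⟨a, b, rfl⟩
      have hsc : pvSplit '[' (']' :: rest) = (']' :: h) :: t := by
        simp only [pvSplit, hsr]; rw [if_neg (by decide)]
      obtain ⟨h1, t1, he1, he2⟩ := pvSplit_append '[' buf (']' :: rest) hb1
      rw [hsc] at he1
      cases he1
      -- Pre facts
      have hcount : (buf ++ ']' :: h).count ']' ≤ 1 := hpre _ (by rw [he2]; exact List.mem_cons_self)
      have hh : ']' ∉ h := by
        intro hmem
        have h1 := List.count_pos_iff.mpr hmem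
        simp [List.count_append] at hcount
        omega
      have hpre' : ∀ seg ∈ pvSplit '[' ([] ++ rest), seg.count ']' ≤ 1 := by
        intro seg hseg
        simp only [List.nil_append] at hseg
        rw [hsr] at hseg
        cases hseg with
        | head =>
          have := List.count_eq_zero_of_not_mem hh
          omega
        | tail _ hmem => exact hpre seg (by rw [he2]; exact List.mem_cons_of_mem _ hmem)
      -- evaluate both sides
      obtain ⟨htk, hdw⟩ := pv_takeWhile_append buf h hb2
      have hmem1 : ']' ∈ buf ++ ']' :: h := by simp
      have hins : pvInsideParts (buf ++ ']' :: rest) =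
          buf :: (pvSplit '[' rest).tail.filterMap
            (fun seg => if ']' ∈ seg then some (seg.takeWhile (· ≠ ']')) else none) := by
        simp only [pvInsideParts, he2, List.filterMap_cons, if_pos hmem1, htk, hsr, List.tail_cons]
      have houts : pvOutsideParts (buf ++ ']' :: rest) =
          h :: (pvSplit '[' rest).tail.map
            (fun seg => if ']' ∈ seg then (seg.dropWhile (· ≠ ']')).tail else seg) := by
        simp only [pvOutsideParts, he2, List.map_cons, if_pos hmem1, hdw, List.tail_cons, hsr]
      have hins' : pvInsideParts rest =
          (pvSplit '[' rest).tail.filterMap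
            (fun seg => if ']' ∈ seg then some (seg.takeWhile (· ≠ ']')) else none) := by
        simp only [pvInsideParts, hsr, List.filterMap_cons, if_neg hh, List.tail_cons]
      have houts' : pvOutsideParts rest =
          h :: (pvSplit '[' rest).tail.map
            (fun seg => if ']' ∈ seg then (seg.dropWhile (· ≠ ']')).tail else seg) := by
        simp only [pvOutsideParts, hsr, List.map_cons, if_neg hh, List.tail_cons]
      have hrec := ih [] good (by simp) (by simp) hpre'
      simp only [List.nil_append] at hrec
      simp only [pv_altGo, hrec, pvEval, hins, houts, hins', houts', List.any_cons]
      by_cases h1 : pv_has_abba buf <;> by_cases h2 : ((pvSplit '[' rest).tail.filterMap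
            (fun seg => if ']' ∈ seg then some (seg.takeWhile (· ≠ ']')) else none)).any pv_has_abba <;>
        by_cases hg : good <;> simp [h1, h2, hg]
    · by_cases hc2 : c = '['
      · subst hc2
        have hsc : pvSplit '[' ('[' :: rest) = [] :: pvSplit '[' rest := by
          simp [pvSplit]
        obtain ⟨h1, t1, he1, he2⟩ := pvSplit_append '[' buf ('[' :: rest) hb1
        rw [hsc] at he1
        cases he1
        rw [List.append_nil] at he2
        have hpre' : ∀ seg ∈ pvSplit '[' ([] ++ rest), seg.count ']' ≤ 1 := by
          intro seg hseg
          simp only [List.nil_append] at hseg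
          exact hpre seg (by rw [he2]; exact List.mem_cons_of_mem _ hseg)
        have hrec := ih [] (good || pv_has_abba buf) (by simp) (by simp) hpre'
        simp only [List.nil_append] at hrec
        have hins : pvInsideParts (buf ++ '[' :: rest) = pvInsideParts rest := by
          simp only [pvInsideParts, he2, List.filterMap_cons, if_neg hb2]
        have houts : pvOutsideParts (buf ++ '[' :: rest) = buf :: pvOutsideParts rest := by
          simp only [pvOutsideParts, he2, List.map_cons, if_neg hb2]
        simp only [pv_altGo, if_neg (by decide : ¬('[' = ']')), hrec, pvEval,
          hins, houts, List.any_cons]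
        by_cases h1 : (pvInsideParts rest).any pv_has_abba <;> simp [h1]
        cases good <;> cases pv_has_abba buf <;> simp
      · have hb1' : '[' ∉ buf ++ [c] := by simp [hb1]; exact fun h => hc2 h.symm
        have hb2' : ']' ∉ buf ++ [c] := by simp [hb2]; exact fun h => hc h.symm
        have hpre' : ∀ seg ∈ pvSplit '[' ((buf ++ [c]) ++ rest), seg.count ']' ≤ 1 := by
          intro seg hseg
          exact hpre seg (by simpa [List.append_assoc] using hseg)
        have hrec := ih (buf ++ [c]) good hb1' hb2' hpre'
        simp only [pv_altGo, if_neg hc, if_neg hc2, hrec]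
        rw [List.append_assoc]
        rfl

theorem pv_isIn_bracket (line : String) : PySem.Str.isIn "]" line = true ↔ ']' ∈ line.toList := by
  rw [PySem.Str.isIn_iff_infix]
  constructor
  · intro h; exact (List.singleton_infix_iff ']' line.toList).mp (by simpa using h)
  · intro h; simpa using (List.singleton_infix_iff ']' line.toList).mpr h

theorem pv_split_bracket (line : String) (hc : line.toList.count ']' ≤ 1)
    (hm : ']' ∈ line.toList) :
    ∃ u v : String, PySem.Str.split? line "]" = some [u, v] ∧
      u.toList = line.toList.takeWhile (· ≠ ']') ∧
      v.toList = (line.toList.dropWhile (· ≠ ']')).tail := by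
  have h1 : Option.map (List.map String.toList) (PySem.Str.split? line "]") =
      some [line.toList.takeWhile (· ≠ ']'), (line.toList.dropWhile (· ≠ ']')).tail] := by
    rw [PySem.Str.split?_map]
    have hsep : ("]" : String).toList = [']'] := by decide
    rw [hsep]
    simp only [PySem.Chars.split?, List.isEmpty_cons, Bool.false_eq_true, if_false,
      Option.some_inj]
    rw [splitOn_eq_pvSplit, pvSplit_of_count_one _ hc hm]
  rcases hsp : PySem.Str.split? line "]" with _ | L
  · rw [hsp] at h1; simp at h1
  · rw [hsp] at h1
    simp only [Option.map_some, Option.some_inj] at h1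
    rcases L with _ | ⟨u, _ | ⟨v, _ | w⟩⟩
    · have := congrArg List.length h1; simp at this
    · have := congrArg List.length h1; simp at this
    · simp only [List.map_cons, List.map_nil, List.cons.injEq, and_true] at h1
      exact ⟨u, v, rfl, h1.1, h1.2⟩
    · have := congrArg List.length h1; simp at this

theorem pv_fold_split (ss : List String) : ∀ (ins outs : List String),
    (∀ line ∈ ss, line.toList.count ']' ≤ 1) →
    ∃ I O : List String,
      ss.foldl
        (fun acc line =>
          match acc with
          | none => none
          | some (ins, outs) =>
            if PySem.Str.isIn "]" line then
              match PySem.Str.split? line "]" with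
              | some [inside, outside] => some (ins ++ [inside], outs ++ [outside])
              | _ => none
            else some (ins, outs ++ [line]))
        (some (ins, outs)) = some (I, O) ∧
      I.map String.toList = ins.map String.toList ++
        (ss.map String.toList).filterMap
          (fun seg => if ']' ∈ seg then some (seg.takeWhile (· ≠ ']')) else none) ∧
      O.map String.toList = outs.map String.toList ++
        (ss.map String.toList).map
          (fun seg => if ']' ∈ seg then (seg.dropWhile (· ≠ ']')).tail else seg) := by
  induction ss with
  | nil => intro ins outs _; exact ⟨ins, outs, rfl, by simp, by simp⟩
  | cons line ss ih =>
    intro ins outs hc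
    by_cases hmem : ']' ∈ line.toList
    · obtain ⟨u, v, hsp, hu, hv⟩ := pv_split_bracket line (hc line (by simp)) hmem
      obtain ⟨I, O, hfold, hI, hO⟩ := ih (ins ++ [u]) (outs ++ [v])
        (fun l hl => hc l (List.mem_cons_of_mem _ hl))
      refine ⟨I, O, ?_, ?_, ?_⟩
      · simp only [List.foldl_cons, if_pos (pv_isIn_bracket line |>.mpr hmem), hsp]
        exact hfold
      · rw [hI]; simp [hu, if_pos hmem]
      · rw [hO]; simp [hv, if_pos hmem]
    · obtain ⟨I, O, hfold, hI, hO⟩ := ih ins (outs ++ [line])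
        (fun l hl => hc l (List.mem_cons_of_mem _ hl))
      refine ⟨I, O, ?_, ?_, ?_⟩
      · simp only [List.foldl_cons,
          if_neg (fun h => hmem ((pv_isIn_bracket line).mp h))]
        exact hfold
      · rw [hI]; simp [if_neg hmem]
      · rw [hO]; simp [if_neg hmem]

theorem pv_any_map (l : List String) :
    l.any pv_is_contain_abba = (l.map String.toList).any pv_has_abba := by
  simp only [List.any_map]
  congr 1; funext s; simp [pv_is_contain_abba_eq s, Function.comp]

theorem aside_eq (data : String) (hp : Pre_is_suitable_abba data) :
    is_suitable_abba data = pvEval data.toList false := by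
  unfold Pre_is_suitable_abba at hp
  rw [splitOn_eq_pvSplit] at hp
  -- outer split
  have h1 : Option.map (List.map String.toList) (PySem.Str.split? data "[") =
      some (pvSplit '[' data.toList) := by
    rw [PySem.Str.split?_map]
    have hsep : ("[" : String).toList = ['['] := by decide
    rw [hsep]
    simp only [PySem.Chars.split?, List.isEmpty_cons, Bool.false_eq_true, if_false,
      Option.some_inj]
    rw [splitOn_eq_pvSplit]
  rcases hsp : PySem.Str.split? data "[" with _ | ss
  · rw [hsp] at h1; simp at h1
  · rw [hsp] at h1
    simp only [Option.map_some, Option.some_inj] at h1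
    have hc : ∀ line ∈ ss, line.toList.count ']' ≤ 1 := by
      intro line hl
      exact hp line.toList (h1 ▸ List.mem_map_of_mem hl)
    obtain ⟨I, O, hfold, hI, hO⟩ := pv_fold_split ss [] [] hc
    unfold is_suitable_abba pv_splitting
    rw [hsp]
    simp only [hfold]
    rw [pv_any_map I, pv_any_map O, hI, hO]
    simp only [List.map_nil, List.nil_append, h1]
    unfold pvEval pvInsideParts pvOutsideParts
    by_cases hi : ((pvSplit '[' data.toList).filterMap
        (fun seg => if ']' ∈ seg then some (seg.takeWhile (· ≠ ']')) else none)).any pv_has_abba <;>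
      simp [hi, pv_has_abba]

-- ===== VERDICT (by name: the statement is the Claim_ definition above) =====
theorem is_suitable_abba_spec : Claim_equal_is_suitable_abba := by
  intro data _ hp
  unfold Spec_is_suitable_abba
  have hb : is_suitable_abba_alt data = pvEval data.toList false := by
    have := altGo_eq data.toList [] false (by simp) (by simp)
    simp only [List.nil_append] at this
    refine (this ?_).trans rfl
    intro seg hseg
    exact hp seg (by rwa [splitOn_eq_pvSplit])
  rw [aside_eq data hp, hb]

theorem is_suitable_abba_raises : Claim_raises_is_suitable_abba := by
  unfold Claim_raises_is_suitable_abba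
  constructor
  · intro data _ hr hp
    obtain ⟨seg, hseg, h2⟩ := hr
    have := hp seg hseg
    omega
  · exact ⟨by decide, by decide, by decide⟩

-- self-check: the raise witness itself lies outside Pre_ (via is_suitable_abba_raises)
theorem pvRaiseWitness_not_pre_ok :
    ¬ Pre_is_suitable_abba pvRaiseWitness_is_suitable_abba :=
  is_suitable_abba_raises.1 pvRaiseWitness_is_suitable_abba (by decide) (by decide)
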